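-- pv_equiv track=rewrite | github.com/mwiens91/practice-problems | leetcode/1652.defuse-the-bomb.py | decrypt
-- ===== SOURCE A (Python) =====
-- def decrypt(code: list[int], k: int) -> list[int]:
--     # Store result in separate array
--     n = len(code)
--     result = [0] * n
--
--     # Get out if k == 0
--     if k == 0:
--         return result
--
--     # Build up result
--     for idx in range(n):
--         sum_ = 0
--
--         if k > 0:
--             # Next k numbers
--             range_ = range(idx + 1, idx + 1 + k)
--         else:
--             # Previous k numbers
--             range_ = range(idx - 1, idx - 1 + k, -1)
--
--         # Sum the numbers
--         for sum_idx in range_: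
--             sum_ += code[sum_idx % n]
--
--         result[idx] = sum_
--
--     return result
-- ===== SOURCE B (Python) =====
-- def decrypt(code: list[int], k: int) -> list[int]:
--     # Sliding window with a running sum: O(n + |k|) instead of O(n * |k|).
--     n = len(code)
--     if k == 0 or n == 0:
--         return [0] * n
--     lo, hi = (1, k) if k > 0 else (k, -1)
--     s = sum(code[j % n] for j in range(lo, hi + 1))
--     result = []
--     for idx in range(n):
--         result.append(s)
--         s += code[(idx + 1 + hi) % n] - code[(idx + lo) % n]
--     return result
-- ===== Notes on version B (the rewrite author's own statement) =====
-- stated objective: faster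
-- what changed: Replaced A's per-index inner loop summing k cyclic neighbours with a single sliding window that keeps a running sum, updated per index by adding the entering element and subtracting the leaving one.
import Mathlib
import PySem

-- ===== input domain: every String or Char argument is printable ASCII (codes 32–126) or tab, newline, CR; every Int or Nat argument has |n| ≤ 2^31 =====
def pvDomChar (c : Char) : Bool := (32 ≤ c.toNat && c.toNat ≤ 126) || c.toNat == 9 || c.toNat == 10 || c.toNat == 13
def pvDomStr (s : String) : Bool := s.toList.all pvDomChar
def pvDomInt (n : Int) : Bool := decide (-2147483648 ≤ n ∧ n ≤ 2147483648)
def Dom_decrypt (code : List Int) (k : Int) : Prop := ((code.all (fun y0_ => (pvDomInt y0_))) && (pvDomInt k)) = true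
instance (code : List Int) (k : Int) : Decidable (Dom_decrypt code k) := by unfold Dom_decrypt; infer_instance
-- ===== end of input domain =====

-- B replaces A's per-index O(|k|) inner summation by a single sliding window with a
-- running sum (objective: faster, O(n*|k|) -> O(n+|k|)). Equivalence is about the return value.

-- ===== PORT A =====
def decrypt (code : List Int) (k : Int) : List Int :=
  let n : Int := code.length
  let result : List Int := List.replicate code.length 0
  if k = 0 then result
  else
    (List.range code.length).map (fun idx =>
      let range_ : List Int :=
        if k > 0 then PySem.List.pyRange ((idx : Int) + 1) ((idx : Int) + 1 + k) 1
        else PySem.List.pyRange ((idx : Int) - 1) ((idx : Int) - 1 + k) (-1)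
      range_.foldl (fun s j => s + PySem.List.pyGetD code (PySem.Int.mod j n) 0) 0)

-- ===== PORT B =====
def decrypt_alt (code : List Int) (k : Int) : List Int :=
  let n : Int := code.length
  if k = 0 ∨ code.length = 0 then List.replicate code.length 0
  else
    let lo : Int := if k > 0 then 1 else k
    let hi : Int := if k > 0 then k else -1
    let s0 : Int :=
      ((PySem.List.pyRange lo (hi + 1) 1).map
        (fun j => PySem.List.pyGetD code (PySem.Int.mod j n) 0)).sum
    ((PySem.List.pyRange 0 n 1).foldl
      (fun (p : List Int × Int) (idx : Int) =>
        (p.1 ++ [p.2],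
         p.2 + PySem.List.pyGetD code (PySem.Int.mod (idx + 1 + hi) n) 0
             - PySem.List.pyGetD code (PySem.Int.mod (idx + lo) n) 0))
      ([], s0)).1

-- ===== PRECONDITION & SPEC =====
def Spec_decrypt (code : List Int) (k : Int) (out : List Int) : Prop := out = decrypt_alt code k
instance (code : List Int) (k : Int) (out : List Int) : Decidable (Spec_decrypt code k out) := by unfold Spec_decrypt; infer_instance

-- ===== CLAIM (what is proved, stated in full; the proofs are below) =====
def Claim_equal_decrypt : Prop := ∀ (code : List Int) (k : Int), Dom_decrypt code k → Spec_decrypt code k (decrypt code k)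

-- ===== LEMMAS AND PROOFS =====

-- window sum of g over indices i+lo .. i+hi (inclusive)
def pvW (g : Int → Int) (lo hi i : Int) : Int :=
  ((PySem.List.pyRange (i + lo) (i + hi + 1) 1).map g).sum

-- sliding-window step
lemma pvW_succ (g : Int → Int) (lo hi i : Int) (h : lo ≤ hi) :
    pvW g lo hi (i + 1) = pvW g lo hi i + g (i + 1 + hi) - g (i + lo) := by
  unfold pvW
  rw [show i + 1 + lo = (i + lo) + 1 by ring,
      show i + 1 + hi + 1 = (i + hi + 1) + 1 by ring,
      PySem.List.pyRange_one_succ_right (by omega),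
      PySem.List.pyRange_one_cons (a := i + lo) (b := i + hi + 1) (by omega)]
  simp [show i + hi + 1 = i + 1 + hi by ring]
  ring

-- B's fold invariant
lemma pvFold_inv (g : Int → Int) (lo hi : Int) (h : lo ≤ hi) (m : Nat) :
    (PySem.List.pyRange 0 (m : Int) 1).foldl
      (fun (p : List Int × Int) (idx : Int) =>
        (p.1 ++ [p.2], p.2 + g (idx + 1 + hi) - g (idx + lo)))
      ([], pvW g lo hi 0)
    = ((List.range m).map (fun i => pvW g lo hi (i : Int)), pvW g lo hi (m : Int)) := by
  induction m with
  | zero => simp [PySem.List.pyRange_one_eq_nil]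
  | succ m ih =>
    rw [show ((m + 1 : Nat) : Int) = (m : Int) + 1 by push_cast; ring,
        PySem.List.pyRange_one_succ_right (by positivity),
        List.foldl_append, ih]
    simp [List.range_succ, pvW_succ g lo hi (m : Int) h]

theorem decrypt_spec : Claim_equal_decrypt := by
  intro code k _
  unfold Spec_decrypt decrypt decrypt_alt
  by_cases hk : k = 0
  · simp [hk]
  · simp only [hk, false_or]
    by_cases hn : code.length = 0
    · simp [hn]
    · simp only [if_neg hn]
      set n : Int := (code.length : Int) with hnd
      set g : Int → Int := fun j => PySem.List.pyGetD code (PySem.Int.mod j n) 0 with hg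
      set lo : Int := if k > 0 then 1 else k with hlo
      set hi : Int := if k > 0 then k else -1 with hhi
      have hlh : lo ≤ hi := by
        rcases lt_trichotomy k 0 with h | h | h
        · simp [hlo, hhi, not_lt.mpr (le_of_lt h)]; omega
        · exact absurd h hk
        · simp [hlo, hhi, h]; omega
      have hs0 : ((PySem.List.pyRange lo (hi + 1) 1).map g).sum = pvW g lo hi 0 := by
        unfold pvW; norm_num
      rw [hs0, pvFold_inv g lo hi hlh code.length]
      refine List.map_congr_left (fun idx _ => ?_)
      by_cases hkp : k > 0
      · simp only [if_pos hkp]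
        rw [PySem.List.foldl_add (g := g)]
        unfold pvW
        rw [show (idx : Int) + lo = (idx : Int) + 1 by simp [hlo, hkp],
            show (idx : Int) + hi + 1 = (idx : Int) + 1 + k by simp [hhi, hkp]; ring]
        simp
      · simp only [if_neg hkp]
        rw [PySem.List.pyRange_neg_one_eq_reverse,
            PySem.List.foldl_add (g := g)]
        unfold pvW
        rw [show (idx : Int) + lo = (idx : Int) - 1 + k + 1 by simp [hlo, hkp]; ring,
            show (idx : Int) + hi + 1 = (idx : Int) - 1 + 1 by simp [hhi, hkp]]
        simp
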